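-- pv_equiv track=rewrite | github.com/sekhyuni/lolnews | Model/model_search_ws.py | rm_subseq_word_backward
-- ===== SOURCE A (Python) =====
-- from collections import defaultdict
--
-- def is_subsequence(s1, s2, m, n):
--     """
--     s1이 s2의 subsequence인지 확인
--     m = len(s1)
--     n = len(s2)
--     """
--     if m == 0:
--         return True
--     if n == 0:
--         return False
--
--     if s1[m-1] == s2[n-1]:
--         return is_subsequence(s1, s2, m-1, n-1)
--     return is_subsequence(s1, s2, m, n-1)
--
-- def _find_subseq_word(word, c_word_lst):
--     """
--     input:
--         - word: base 단어
--         - c_word_lst: 단어 리스트(base 단어 다음 단어부터)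
--     output:
--         - rm_word_set: 삭제할 단어
--     """
--     rm_word_dict = defaultdict(list)
--     for c_word in c_word_lst:
--         if is_subsequence(word, c_word, len(word), len(c_word)):
--             rm_word_dict[word].append(c_word)
--     return rm_word_dict
--
-- def rm_subseq_word_backward(word_lst, n):
--     word_lst_topn = word_lst[:n]
--     rm_word_dict = defaultdict(list)
--
--     for i, word in enumerate(word_lst_topn):
--         new_rm_word_dict = _find_subseq_word(word, word_lst_topn[:i])
--         for w, remain_lst in new_rm_word_dict.items():
--             rm_word_dict[w] += remain_lst
--
--     word_lst = [w for w in word_lst if w not in rm_word_dict.keys()]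
--     return word_lst, rm_word_dict
-- ===== SOURCE B (Python) =====
-- from collections import defaultdict
--
-- def rm_subseq_word_backward(word_lst, n):
--     topn = word_lst[:n]
--     rm_word_dict = defaultdict(list)
--     for i, word in enumerate(topn):
--         for c_word in topn[:i]:
--             it = iter(c_word)
--             if all(ch in it for ch in word):
--                 rm_word_dict[word].append(c_word)
--     return [w for w in word_lst if w not in rm_word_dict], rm_word_dict
-- ===== Notes on version B (the rewrite author's own statement) =====
-- stated objective: idiomatic
-- what changed: Inlines A's two helpers into one double loop that appends matches directly into the dict, and replaces A's backward recursive subsequence test with the idiomatic forward iterator scan (it = iter(c_word); all(ch in it for ch in word)).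
import Mathlib
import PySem

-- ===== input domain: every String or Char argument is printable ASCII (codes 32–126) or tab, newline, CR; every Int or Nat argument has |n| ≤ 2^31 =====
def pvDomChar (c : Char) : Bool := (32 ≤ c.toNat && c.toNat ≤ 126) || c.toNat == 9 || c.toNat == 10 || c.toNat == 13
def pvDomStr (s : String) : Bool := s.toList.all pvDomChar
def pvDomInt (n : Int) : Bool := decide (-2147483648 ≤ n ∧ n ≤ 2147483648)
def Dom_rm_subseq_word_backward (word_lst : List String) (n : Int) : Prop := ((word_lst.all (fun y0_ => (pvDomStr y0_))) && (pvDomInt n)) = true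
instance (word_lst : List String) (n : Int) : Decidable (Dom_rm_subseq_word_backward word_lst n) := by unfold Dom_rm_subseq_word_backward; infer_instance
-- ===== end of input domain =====

-- B inlines A's two helpers into one double loop and replaces A's backward recursive
-- subsequence test by the idiomatic forward iterator scan (objective: idiomatic; no speed claim).

-- ===== PORT A =====
-- is_subsequence(s1, s2, m, n): backward recursion; at the call sites m,n are the lengths,
-- so s1[m-1]/s2[n-1] are always in range (ported as getD, exact on those calls)
def is_subsequence (s1 s2 : List Char) : Nat → Nat → Bool
  | 0, _ => true
  | _ + 1, 0 => false
  | m + 1, n + 1 =>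
    if s1.getD m ' ' == s2.getD n ' ' then is_subsequence s1 s2 m n
    else is_subsequence s1 s2 (m + 1) n

def find_subseq_word (word : String) (c_word_lst : List String) : PySem.Dict String (List String) :=
  c_word_lst.foldl (fun d c_word =>
    if is_subsequence word.toList c_word.toList word.toList.length c_word.toList.length then
      d.insert word (d.getD word [] ++ [c_word])
    else d) PySem.Dict.empty

def rm_subseq_word_backward (word_lst : List String) (n : Int) : List String × (List (String × List String)) :=
  let word_lst_topn := PySem.List.slice word_lst none (some n)
  let rm := (PySem.List.enumerate word_lst_topn).foldl
    (fun rm p =>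
      let new_rm := find_subseq_word p.2 (PySem.List.slice word_lst_topn none (some p.1))
      new_rm.items.foldl (fun rm q => rm.insert q.1 (rm.getD q.1 [] ++ q.2)) rm)
    PySem.Dict.empty
  (word_lst.filter (fun w => !(rm.keys.contains w)), rm.items)

-- ===== PORT B =====
-- `it = iter(c_word); all(ch in it for ch in word)`: front-to-back two-pointer subsequence test
def isSubseqFwd : List Char → List Char → Bool
  | [], _ => true
  | _ :: _, [] => false
  | a :: s, b :: t => if a == b then isSubseqFwd s t else isSubseqFwd (a :: s) t

def rm_subseq_word_backward_alt (word_lst : List String) (n : Int) : List String × (List (String × List String)) :=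
  let topn := PySem.List.slice word_lst none (some n)
  let rm := (PySem.List.enumerate topn).foldl
    (fun rm p =>
      (PySem.List.slice topn none (some p.1)).foldl
        (fun rm c_word =>
          if isSubseqFwd p.2.toList c_word.toList then
            rm.insert p.2 (rm.getD p.2 [] ++ [c_word])
          else rm) rm)
    PySem.Dict.empty
  (word_lst.filter (fun w => !(rm.contains w)), rm.items)

-- ===== PRECONDITION & SPEC =====
def Spec_rm_subseq_word_backward (word_lst : List String) (n : Int) (out : List String × (List (String × List String))) : Prop := out = rm_subseq_word_backward_alt word_lst n
instance (word_lst : List String) (n : Int) (out : List String × (List (String × List String))) : Decidable (Spec_rm_subseq_word_backward word_lst n out) := by unfold Spec_rm_subseq_word_backward; infer_instance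

-- ===== CLAIM (what is proved, stated in full; the proofs are below) =====
def Claim_equal_rm_subseq_word_backward : Prop := ∀ (word_lst : List String) (n : Int), Dom_rm_subseq_word_backward word_lst n → Spec_rm_subseq_word_backward word_lst n (rm_subseq_word_backward word_lst n)

-- ===== LEMMAS AND PROOFS =====

-- forward two-pointer test decides List.Sublist
theorem isSubseqFwd_iff_sublist (b a : List Char) : isSubseqFwd a b = true ↔ a.Sublist b := by
  induction b generalizing a with
  | nil => cases a <;> simp [isSubseqFwd]
  | cons y t ih =>
    cases a with
    | nil => simp [isSubseqFwd]
    | cons x s =>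
      by_cases hxy : x = y
      · subst hxy
        simp [isSubseqFwd, ih, List.cons_sublist_cons]
      · have hbeq : (x == y) = false := by simp [hxy]
        rw [isSubseqFwd, hbeq]
        simp only [Bool.false_eq_true, if_false]
        rw [ih]
        constructor
        · exact fun hs => hs.cons _
        · intro hs
          cases hs with
          | cons _ hs => exact hs
          | cons₂ => exact absurd rfl hxy

theorem isSubseqFwd_reverse (a b : List Char) :
    isSubseqFwd a.reverse b.reverse = isSubseqFwd a b := by
  rw [Bool.eq_iff_iff, isSubseqFwd_iff_sublist, isSubseqFwd_iff_sublist, List.reverse_sublist]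

-- A's backward recursion on prefixes equals the forward test on the reversed prefixes
theorem rev_take_succ {α : Type} (l : List α) (k : Nat) (hk : k < l.length) :
    (l.take (k + 1)).reverse = l[k] :: (l.take k).reverse := by
  rw [List.take_add_one]
  simp [List.getElem?_eq_getElem hk]

theorem is_subsequence_eq_fwd_rev (s1 s2 : List Char) (m n : Nat)
    (hm : m ≤ s1.length) (hn : n ≤ s2.length) :
    is_subsequence s1 s2 m n = isSubseqFwd (s1.take m).reverse (s2.take n).reverse := by
  induction n generalizing m with
  | zero =>
    cases m with
    | zero => simp [is_subsequence, isSubseqFwd]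
    | succ k =>
      have hk : k < s1.length := by omega
      rw [is_subsequence, rev_take_succ s1 k hk]
      simp [isSubseqFwd]
  | succ n ih =>
    cases m with
    | zero => simp [is_subsequence, isSubseqFwd]
    | succ k =>
      have hk : k < s1.length := by omega
      have hn' : n < s2.length := by omega
      rw [is_subsequence, rev_take_succ s1 k hk, rev_take_succ s2 n hn', isSubseqFwd]
      rw [List.getD_eq_getElem s1 ' ' hk, List.getD_eq_getElem s2 ' ' hn']
      by_cases h : s1[k] = s2[n]
      · simp only [h, beq_self_eq_true, if_true]
        rw [ih k (by omega) (by omega)]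
      · have hbeq : (s1[k] == s2[n]) = false := by simp [h]
        rw [hbeq]
        simp only [Bool.false_eq_true, if_false]
        rw [ih (k + 1) hm (by omega), rev_take_succ s1 k hk]

theorem is_subsequence_eq_isSubseqFwd (s1 s2 : List Char) :
    is_subsequence s1 s2 s1.length s2.length = isSubseqFwd s1 s2 := by
  rw [is_subsequence_eq_fwd_rev s1 s2 s1.length s2.length le_rfl le_rfl,
    List.take_length, List.take_length, isSubseqFwd_reverse]

-- the shared inner loop of both ports, parametrised by the subsequence predicate
def innerFold (P : String → Bool) (word : String) (prev : List String)
    (d : PySem.Dict String (List String)) : PySem.Dict String (List String) :=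
  prev.foldl (fun d c => if P c then d.insert word (d.getD word [] ++ [c]) else d) d

theorem innerFold_eq (P : String → Bool) (word : String) (prev : List String)
    (d : PySem.Dict String (List String)) :
    innerFold P word prev d =
      if prev.filter P = [] then d
      else d.insert word (d.getD word [] ++ prev.filter P) := by
  induction prev generalizing d with
  | nil => simp [innerFold]
  | cons c prev ih =>
    rw [innerFold, List.foldl_cons]
    by_cases hc : P c = true
    · rw [if_pos hc]
      rw [show (prev.foldl (fun d c => if P c then d.insert word (d.getD word [] ++ [c]) else d)
          (d.insert word (d.getD word [] ++ [c]))) = innerFold P word prev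
          (d.insert word (d.getD word [] ++ [c])) from rfl, ih]
      rw [List.filter_cons_of_pos hc]
      by_cases hf : prev.filter P = []
      · simp [hf]
      · rw [if_neg hf, if_neg (by simp)]
        rw [PySem.Dict.getD_insert_self, PySem.Dict.insert_insert_self, List.append_assoc]
        rfl
    · rw [if_neg hc]
      rw [show (prev.foldl (fun d c => if P c then d.insert word (d.getD word [] ++ [c]) else d) d)
          = innerFold P word prev d from rfl, ih]
      rw [List.filter_cons_of_neg (by simpa using hc)]

-- merging the items of A's per-word helper dict into d is B's direct inner loop
theorem merge_find_eq_inner (word : String) (prev : List String)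
    (d : PySem.Dict String (List String)) :
    (find_subseq_word word prev).items.foldl
        (fun rm q => rm.insert q.1 (rm.getD q.1 [] ++ q.2)) d =
      innerFold (fun c => is_subsequence word.toList c.toList word.toList.length c.toList.length)
        word prev d := by
  have hfind : find_subseq_word word prev =
      innerFold (fun c => is_subsequence word.toList c.toList word.toList.length c.toList.length)
        word prev PySem.Dict.empty := rfl
  rw [hfind, innerFold_eq, innerFold_eq]
  by_cases hf : prev.filter
      (fun c => is_subsequence word.toList c.toList word.toList.length c.toList.length) = []
  · rw [if_pos hf, if_pos hf]
    rfl
  · rw [if_neg hf, if_neg hf]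
    rfl

-- ===== VERDICT (by name: the statement is the Claim_ definition above) =====
theorem rm_subseq_word_backward_spec : Claim_equal_rm_subseq_word_backward := by
  intro word_lst n _
  unfold Spec_rm_subseq_word_backward rm_subseq_word_backward rm_subseq_word_backward_alt
  dsimp only
  have hP : ∀ (w c : String),
      is_subsequence w.toList c.toList w.toList.length c.toList.length = isSubseqFwd w.toList c.toList :=
    fun w c => is_subsequence_eq_isSubseqFwd _ _
  have hkc : ∀ (d : PySem.Dict String (List String)) (w : String),
      d.keys.contains w = d.contains w := by
    intro d w
    rw [Bool.eq_iff_iff, PySem.Dict.contains_iff_mem_keys, List.contains_iff_mem]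
  have hstep : (fun (rm : PySem.Dict String (List String)) (p : Int × String) =>
        (find_subseq_word p.2 (PySem.List.slice (PySem.List.slice word_lst none (some n)) none (some p.1))).items.foldl
          (fun rm q => rm.insert q.1 (rm.getD q.1 [] ++ q.2)) rm) =
      (fun (rm : PySem.Dict String (List String)) (p : Int × String) =>
        (PySem.List.slice (PySem.List.slice word_lst none (some n)) none (some p.1)).foldl
          (fun rm c_word =>
            if isSubseqFwd p.2.toList c_word.toList then
              rm.insert p.2 (rm.getD p.2 [] ++ [c_word])
            else rm) rm) := by
    funext rm p
    rw [merge_find_eq_inner]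
    unfold innerFold
    simp only [hP]
  rw [hstep]
  simp only [hkc]
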